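-- pv_equiv track=rewrite | github.com/IAmJonoBo/Prometheus | chiron/tools/format_yaml.py | _inspect_literal_block
-- ===== SOURCE A (Python) =====
-- def _inspect_literal_block(
--     lines: list[str], start_index: int, base_indent: int
-- ) -> tuple[int, list[tuple[int, str]]]:
--     issues: list[tuple[int, str]] = []
--     min_indent = base_indent + 2
--     index = start_index + 1
--     total = len(lines)
--     while index < total:
--         candidate = lines[index]
--         stripped = candidate.rstrip("\n")
--         stripped_content = stripped.lstrip()
--         if stripped_content == "":
--             index += 1
--             continue
--         indent = len(candidate) - len(candidate.lstrip(" "))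
--         is_comment = stripped_content.startswith("#")
--         if indent <= base_indent and not is_comment:
--             break
--         if not is_comment and indent < min_indent:
--             issues.append(
--                 (
--                     index + 1,
--                     "literal block line is indented "
--                     f"{indent} spaces; expected at least {min_indent}",
--                 )
--             )
--         index += 1
--     return index, issues
-- ===== SOURCE B (Python) =====
-- def _indent(line):
--     return len(line) - len(line.lstrip(" "))
--
--
-- def _content(line):
--     return line.rstrip("\n").lstrip()
--
--
-- def _inspect_literal_block(
--     lines: list[str], start_index: int, base_indent: int
-- ) -> tuple[int, list[tuple[int, str]]]:
--     total = len(lines)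
--     begin = start_index + 1
--     # Pass 1: find the block's end (first non-blank, non-comment line at or
--     # below the base indent); `max` keeps the "one past the scanned region"
--     # convention when begin is already past the end.
--     end = max(begin, total)
--     for i in range(begin, total):
--         c = _content(lines[i])
--         if c != "" and not c.startswith("#") and _indent(lines[i]) <= base_indent:
--             end = i
--             break
--     # Pass 2: collect under-indented lines inside the block.
--     min_indent = base_indent + 2
--     issues = [
--         (
--             i + 1,
--             "literal block line is indented "
--             f"{_indent(lines[i])} spaces; expected at least {min_indent}",
--         )
--         for i in range(begin, end)
--         if _content(lines[i]) != ""
--         and not _content(lines[i]).startswith("#")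
--         and _indent(lines[i]) < min_indent
--     ]
--     return end, issues
-- ===== Notes on version B (the rewrite author's own statement) =====
-- stated objective: alternative
-- what changed: Replaces A's single interleaved while-loop (which advances an index, breaks, and appends issues in one pass) with two separate passes: a boundary scan that finds the block's end index, then a list comprehension over range(begin, end) that collects the under-indented lines.
import Mathlib
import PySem

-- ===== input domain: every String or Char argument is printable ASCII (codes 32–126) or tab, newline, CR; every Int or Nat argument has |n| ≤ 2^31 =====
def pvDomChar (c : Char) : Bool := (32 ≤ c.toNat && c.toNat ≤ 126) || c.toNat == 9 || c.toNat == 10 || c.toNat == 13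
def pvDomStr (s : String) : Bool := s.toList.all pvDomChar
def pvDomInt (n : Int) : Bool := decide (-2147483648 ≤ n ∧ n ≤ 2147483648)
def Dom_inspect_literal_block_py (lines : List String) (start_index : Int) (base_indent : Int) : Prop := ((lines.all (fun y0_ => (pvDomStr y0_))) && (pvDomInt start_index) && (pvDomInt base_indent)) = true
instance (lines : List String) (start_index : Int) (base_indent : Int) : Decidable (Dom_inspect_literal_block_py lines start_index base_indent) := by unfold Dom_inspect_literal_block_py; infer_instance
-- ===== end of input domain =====

-- B replaces A's single interleaved while-loop by a boundary scan followed by a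
-- separate issue-collecting pass over the found range (objective: alternative decomposition).

-- ===== PORT A =====
-- candidate.rstrip("\n"): ported by hand (drop trailing '\n' chars) — exact.
def pvRstripNl (s : String) : List Char :=
  (s.toList.reverse.dropWhile (fun c => c == '\n')).reverse

-- len(candidate) - len(candidate.lstrip(" ")): lstrip(" ") ported by hand (drop leading spaces) — exact.
def pvIndent (s : String) : Int :=
  (s.toList.length : Int) - ((s.toList.dropWhile (fun c => c == ' ')).length : Int)

def pvMsg (indent min_indent : Int) : String :=
  "literal block line is indented " ++ PySem.Int.toStr indent ++
    " spaces; expected at least " ++ PySem.Int.toStr min_indent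

-- the while-loop of A; fuel = (total - index).toNat, one unit per iteration
def inspectGo (lines : List String) (base_indent total : Int) :
    Nat → Int → List (Int × String) → Int × List (Int × String)
  | 0, index, issues => (index, issues)
  | fuel + 1, index, issues =>
    if index < total then
      match PySem.List.pyGet? lines index with
      | none => (index, issues)   -- IndexError; excluded by Pre_
      | some candidate =>
        let stripped_content := PySem.Chars.lstrip (pvRstripNl candidate)
        if stripped_content = [] then
          inspectGo lines base_indent total fuel (index + 1) issues
        else
          let indent := pvIndent candidate
          let is_comment := PySem.Chars.startswith stripped_content ['#']
          if indent ≤ base_indent ∧ is_comment = false then (index, issues)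
          else
            let issues' :=
              if is_comment = false ∧ indent < base_indent + 2 then
                issues ++ [(index + 1, pvMsg indent (base_indent + 2))]
              else issues
            inspectGo lines base_indent total fuel (index + 1) issues'
    else (index, issues)

def inspect_literal_block_py (lines : List String) (start_index : Int) (base_indent : Int) : Int × (List (Int × String)) :=
  let total : Int := lines.length
  inspectGo lines base_indent total (total - (start_index + 1)).toNat (start_index + 1) []

-- ===== PORT B =====
-- first index i in the range whose line is non-blank, non-comment and at/below base indent (the for/break of Source B)
def pvFirstStop (lines : List String) (base_indent : Int) : List Int → Option Int
  | [] => none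
  | i :: rest =>
    match PySem.List.pyGet? lines i with
    | none => none   -- IndexError; excluded by Pre_
    | some line =>
      let c := PySem.Chars.lstrip (pvRstripNl line)
      if c ≠ [] ∧ PySem.Chars.startswith c ['#'] = false ∧ pvIndent line ≤ base_indent then
        some i
      else pvFirstStop lines base_indent rest

-- the list comprehension of Source B
def pvIssueOf (lines : List String) (base_indent : Int) (i : Int) : Option (Int × String) :=
  match PySem.List.pyGet? lines i with
  | none => none   -- IndexError; excluded by Pre_
  | some line =>
    let c := PySem.Chars.lstrip (pvRstripNl line)
    if c ≠ [] ∧ PySem.Chars.startswith c ['#'] = false ∧ pvIndent line < base_indent + 2 then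
      some (i + 1, pvMsg (pvIndent line) (base_indent + 2))
    else none

def inspect_literal_block_py_alt (lines : List String) (start_index : Int) (base_indent : Int) : Int × (List (Int × String)) :=
  let total : Int := lines.length
  let first : Int := start_index + 1
  let stop : Int :=
    (pvFirstStop lines base_indent (PySem.List.pyRange first total 1)).getD (max first total)
  (stop, (PySem.List.pyRange first stop 1).filterMap (pvIssueOf lines base_indent))

-- ===== PRECONDITION & SPEC =====
-- Pre_ excludes exactly the inputs where A raises IndexError: the scan starts below -len(lines)
-- while the loop would still run (start_index + 1 < len(lines)).
def Pre_inspect_literal_block_py (lines : List String) (start_index : Int) (base_indent : Int) : Prop :=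
  -(lines.length : Int) ≤ start_index + 1 ∨ (lines.length : Int) ≤ start_index + 1
instance (lines : List String) (start_index : Int) (base_indent : Int) : Decidable (Pre_inspect_literal_block_py lines start_index base_indent) := by unfold Pre_inspect_literal_block_py; infer_instance

def pvWitness_inspect_literal_block_py : List String × Int × Int := (["key: |", "   ok", " bad", "next: 1"], 0, 1)

def Spec_inspect_literal_block_py (lines : List String) (start_index : Int) (base_indent : Int) (out : Int × (List (Int × String))) : Prop := out = inspect_literal_block_py_alt lines start_index base_indent
instance (lines : List String) (start_index : Int) (base_indent : Int) (out : Int × (List (Int × String))) : Decidable (Spec_inspect_literal_block_py lines start_index base_indent out) := by unfold Spec_inspect_literal_block_py; infer_instance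

-- ===== CLAIM (what is proved, stated in full; the proofs are below) =====
def Claim_equal_inspect_literal_block_py : Prop := ∀ (lines : List String) (start_index : Int) (base_indent : Int), Dom_inspect_literal_block_py lines start_index base_indent → Pre_inspect_literal_block_py lines start_index base_indent → Spec_inspect_literal_block_py lines start_index base_indent (inspect_literal_block_py lines start_index base_indent)

-- ===== LEMMAS AND PROOFS =====

theorem pvFirstStop_mem (lines : List String) (b : Int) (r : List Int) (i : Int)
    (h : pvFirstStop lines b r = some i) : i ∈ r := by
  induction r with
  | nil => simp [pvFirstStop] at h
  | cons j rest ih =>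
    rw [pvFirstStop] at h
    cases hg : PySem.List.pyGet? lines j with
    | none => simp [hg] at h
    | some line =>
      simp only [hg] at h
      split at h
      · simp at h; simp [h]
      · exact List.mem_cons_of_mem _ (ih h)

theorem inspectGo_eq (lines : List String) (b : Int) (fuel : Nat) :
    ∀ (index : Int) (issues : List (Int × String)),
      -(lines.length : Int) ≤ index →
      fuel = ((lines.length : Int) - index).toNat →
      inspectGo lines b (lines.length) fuel index issues =
        (let e := (pvFirstStop lines b
            (PySem.List.pyRange index (lines.length) 1)).getD (max index (lines.length));
         (e, issues ++ (PySem.List.pyRange index e 1).filterMap (pvIssueOf lines b))) := by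
  induction fuel with
  | zero =>
    intro index issues hlo hf
    have hge : (lines.length : Int) ≤ index := by omega
    rw [PySem.List.pyRange_one_eq_nil hge]
    have hmax : max index (lines.length : Int) = index := by omega
    simp [inspectGo, pvFirstStop, hmax, PySem.List.pyRange_one_eq_nil (le_refl index)]
  | succ k ih =>
    intro index issues hlo hf
    have hlt : index < (lines.length : Int) := by omega
    cases hg : PySem.List.pyGet? lines index with
    | none =>
      exfalso
      rw [PySem.List.pyGet?_eq_none_iff] at hg
      exact hg ⟨hlo, hlt⟩
    | some candidate =>
      have hcons := PySem.List.pyRange_one_cons (a := index) (b := (lines.length : Int)) hlt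
      have hmaxs : max index (lines.length : Int) = max (index + 1) (lines.length : Int) := by omega
      rw [inspectGo, if_pos hlt, hg, hcons]
      dsimp only
      by_cases hblank : PySem.Chars.lstrip (pvRstripNl candidate) = []
      · -- blank line: skipped by both the loop and both passes
        have hstop : pvFirstStop lines b (index :: PySem.List.pyRange (index + 1) (lines.length : Int) 1)
            = pvFirstStop lines b (PySem.List.pyRange (index + 1) (lines.length : Int) 1) := by
          rw [pvFirstStop, hg]; simp [hblank]
        rw [if_pos hblank, ih (index + 1) issues (by omega) (by omega)]
        simp only [hstop, hmaxs]
        set e := (pvFirstStop lines b (PySem.List.pyRange (index + 1) (lines.length : Int) 1)).getD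
          (max (index + 1) (lines.length : Int)) with he
        have hie : index < e := by
          cases hfs : pvFirstStop lines b (PySem.List.pyRange (index + 1) (lines.length : Int) 1) with
          | none => simp only [he, hfs, Option.getD_none]; omega
          | some j =>
            have := pvFirstStop_mem lines b _ j hfs
            rw [PySem.List.mem_pyRange_one] at this
            simp [he, hfs]; omega
        rw [PySem.List.pyRange_one_cons hie, List.filterMap_cons]
        have : pvIssueOf lines b index = none := by
          rw [pvIssueOf, hg]; simp [hblank]
        rw [this]
      · rw [if_neg hblank]
        by_cases hbreak : pvIndent candidate ≤ b ∧
            PySem.Chars.startswith (PySem.Chars.lstrip (pvRstripNl candidate)) ['#'] = false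
        · -- break: this line stops the block in both versions
          have hstop : pvFirstStop lines b (index :: PySem.List.pyRange (index + 1) (lines.length : Int) 1)
              = some index := by
            rw [pvFirstStop, hg]
            simp only [ne_eq]
            rw [if_pos ⟨hblank, hbreak.2, hbreak.1⟩]
          rw [if_pos hbreak]
          simp only [hstop, Option.getD_some]
          rw [PySem.List.pyRange_one_eq_nil (le_refl index)]
          simp
        · -- continue: both sides keep scanning; the issue condition matches
          have hstop : pvFirstStop lines b (index :: PySem.List.pyRange (index + 1) (lines.length : Int) 1)
              = pvFirstStop lines b (PySem.List.pyRange (index + 1) (lines.length : Int) 1) := by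
            rw [pvFirstStop, hg]
            simp only [ne_eq]
            rw [if_neg (by tauto)]
          rw [if_neg hbreak, ih (index + 1) _ (by omega) (by omega)]
          simp only [hstop, hmaxs]
          set e := (pvFirstStop lines b (PySem.List.pyRange (index + 1) (lines.length : Int) 1)).getD
            (max (index + 1) (lines.length : Int)) with he
          have hie : index < e := by
            cases hfs : pvFirstStop lines b (PySem.List.pyRange (index + 1) (lines.length : Int) 1) with
            | none => simp only [he, hfs, Option.getD_none]; omega
            | some j =>
              have := pvFirstStop_mem lines b _ j hfs
              rw [PySem.List.mem_pyRange_one] at this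
              simp [he, hfs]; omega
          rw [PySem.List.pyRange_one_cons hie, List.filterMap_cons]
          by_cases happ : PySem.Chars.startswith (PySem.Chars.lstrip (pvRstripNl candidate)) ['#'] = false ∧
              pvIndent candidate < b + 2
          · have : pvIssueOf lines b index
                = some (index + 1, pvMsg (pvIndent candidate) (b + 2)) := by
              rw [pvIssueOf, hg]
              simp only [ne_eq]
              rw [if_pos ⟨hblank, happ.1, happ.2⟩]
            rw [if_pos happ, this]
            simp
          · have : pvIssueOf lines b index = none := by
              rw [pvIssueOf, hg]
              simp only [ne_eq]
              rw [if_neg (by tauto)]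
            rw [if_neg happ, this]

-- ===== VERDICT (by name: the statement is the Claim_ definition above) =====
theorem inspect_literal_block_py_spec : Claim_equal_inspect_literal_block_py := by
  intro lines start_index base_indent _ hpre
  unfold Spec_inspect_literal_block_py inspect_literal_block_py inspect_literal_block_py_alt
  have hlo : -(lines.length : Int) ≤ start_index + 1 := by
    rcases hpre with h | h
    · exact h
    · omega
  rw [inspectGo_eq lines base_indent _ (start_index + 1) [] hlo rfl]
  simp
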